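-- pv_equiv track=rewrite | github.com/DH6688/alphamail-main | alphamail-main/helpers.py | freq_encode
-- ===== SOURCE A (Python) =====
-- def freq_encode(str, dictionary):
--     """
--     Encodes the frequency of each word in the string into a vector based on dictionary list
--     """
--     encoding = [0] * len(dictionary)
--     str = str.lower()
--     words = str.split()
--     for word in words:
--         if word in dictionary:
--             index = dictionary.index(word)
--             encoding[index] += 1
--     return encoding
-- ===== SOURCE B (Python) =====
-- def freq_encode(str, dictionary):
--     """
--     Encodes the frequency of each word in the string into a vector based on dictionary list
--     """
--     counts = {}
--     for word in str.lower().split():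
--         counts[word] = counts.get(word, 0) + 1
--     return [counts.get(w, 0) for w in dictionary]
-- ===== Notes on version B (the rewrite author's own statement) =====
-- stated objective: alternative
-- what changed: B builds a word-frequency dict in one pass over the words and then maps a lookup over the dictionary, instead of A's per-word membership test plus dictionary.index scan; Pre_ excludes inputs where some word of the text occurs more than once in the dictionary, on which A's crediting of the whole count to the first occurrence (and 0 to later duplicates) is an artefact of dictionary.index.
-- outside the precondition, e.g. on freq_encode('a a', ['a', 'a']): A returns [2, 0], B returns [2, 2]
import Mathlib
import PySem

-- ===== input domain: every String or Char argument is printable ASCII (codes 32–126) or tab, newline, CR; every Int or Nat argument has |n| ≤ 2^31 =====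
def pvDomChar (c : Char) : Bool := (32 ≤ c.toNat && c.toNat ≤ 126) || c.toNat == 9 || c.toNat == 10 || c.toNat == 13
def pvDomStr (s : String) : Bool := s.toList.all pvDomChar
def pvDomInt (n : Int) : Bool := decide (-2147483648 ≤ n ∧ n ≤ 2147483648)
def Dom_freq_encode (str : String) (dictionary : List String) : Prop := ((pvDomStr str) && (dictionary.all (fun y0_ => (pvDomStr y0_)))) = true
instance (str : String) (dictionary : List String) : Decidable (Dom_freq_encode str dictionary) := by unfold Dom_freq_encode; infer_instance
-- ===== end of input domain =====

-- B builds a word-frequency dict in one pass and maps lookups over the dictionary, replacing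
-- A's per-word membership test plus dictionary.index scan (objective: alternative decomposition).


-- ===== PORT A =====
-- for word in words: if word in dictionary: encoding[dictionary.index(word)] += 1
def freq_encode (str : String) (dictionary : List String) : List Int :=
  let encoding : List Int := List.replicate dictionary.length 0
  let str := PySem.Str.lower str
  let words := PySem.Str.split₀ str
  words.foldl (fun enc word =>
    match PySem.List.index? dictionary word with
    | some index => enc.set index (enc.getD index 0 + 1)
    | none => enc) encoding

-- ===== PORT B =====
-- counts = {}; counts[word] = counts.get(word, 0) + 1 per word; then [counts.get(w, 0) for w in dictionary]
def freq_encode_alt (str : String) (dictionary : List String) : List Int :=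
  let counts := (PySem.Str.split₀ (PySem.Str.lower str)).foldl
    (fun (d : PySem.Dict String Int) word => d.insert word (d.getD word 0 + 1)) PySem.Dict.empty
  dictionary.map (fun w => counts.getD w 0)

-- ===== PRECONDITION & SPEC =====
-- Pre_ excludes inputs where some word of the (lowercased) text occurs more than once in the
-- dictionary, a corner on which A's crediting of the whole count to the first duplicate entry
-- (and 0 to the later ones) is an artefact of dictionary.index.
def Pre_freq_encode (str : String) (dictionary : List String) : Prop :=
  ∀ w ∈ PySem.Str.split₀ (PySem.Str.lower str), dictionary.count w ≤ 1
instance (str : String) (dictionary : List String) : Decidable (Pre_freq_encode str dictionary) := by unfold Pre_freq_encode; infer_instance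
def pvWitness_freq_encode : String × List String := ("a b a", ["a", "b", "c"])
def Spec_freq_encode (str : String) (dictionary : List String) (out : List Int) : Prop := out = freq_encode_alt str dictionary
instance (str : String) (dictionary : List String) (out : List Int) : Decidable (Spec_freq_encode str dictionary out) := by unfold Spec_freq_encode; infer_instance

-- ===== CLAIM (what is proved, stated in full; the proofs are below) =====
def Claim_equal_freq_encode : Prop := ∀ (str : String) (dictionary : List String), Dom_freq_encode str dictionary → Pre_freq_encode str dictionary → Spec_freq_encode str dictionary (freq_encode str dictionary)

-- ===== LEMMAS AND PROOFS =====

-- A's loop preserves the length of the encoding vector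
theorem lenA (d : List String) (ws : List String) (enc : List Int) :
    (ws.foldl (fun enc word =>
      match PySem.List.index? d word with
      | some index => enc.set index (enc.getD index 0 + 1)
      | none => enc) enc).length = enc.length := by
  induction ws generalizing enc with
  | nil => rfl
  | cons w t ih =>
    rw [List.foldl_cons]
    cases h : PySem.List.index? d w with
    | none => exact ih enc
    | some i => rw [ih]; exact List.length_set ..

-- pointwise value of A's loop: initial value plus the number of processed words whose
-- first index in the dictionary is j
theorem ptA (d : List String) (ws : List String) (enc : List Int) (j : Nat) (hj : j < enc.length) :
    (ws.foldl (fun enc word =>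
      match PySem.List.index? d word with
      | some index => enc.set index (enc.getD index 0 + 1)
      | none => enc) enc).getD j 0
      = enc.getD j 0 + (ws.countP (fun w => PySem.List.index? d w == some j) : Int) := by
  induction ws generalizing enc with
  | nil => simp
  | cons w t ih =>
    rw [List.foldl_cons, List.countP_cons]
    cases h : PySem.List.index? d w with
    | none =>
      rw [ih enc hj]
      simp
    | some i =>
      have hlen : j < (enc.set i (enc.getD i 0 + 1)).length := by
        rw [List.length_set]; exact hj
      rw [ih _ hlen]
      by_cases hij : i = j
      · subst hij
        rw [if_pos (by simp), List.getD_eq_getElem _ _ hlen, List.getElem_set_self,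
          List.getD_eq_getElem _ _ hj]
        omega
      · rw [if_neg (by simp [hij]), List.getD_eq_getElem _ _ hlen, List.getElem_set_ne hij,
          List.getD_eq_getElem _ _ hj]
        omega

-- index? d w = some j forces w = d[j]
theorem index?_some_val (d : List String) (w : String) (j : Nat) (h : PySem.List.index? d w = some j) :
    ∃ hj : j < d.length, d[j] = w := by
  obtain ⟨hk, hv, _⟩ := PySem.List.getElem_of_index?_eq_some h
  exact ⟨hk, hv⟩

-- first-occurrence characterisation: index? d d[j] = some j ↔ d[j] does not occur before j
theorem index?_self_iff (d : List String) (j : Nat) (hj : j < d.length) :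
    PySem.List.index? d d[j] = some j ↔ d[j] ∉ d.take j := by
  constructor
  · intro h
    obtain ⟨_, _, hfirst⟩ := PySem.List.getElem_of_index?_eq_some h
    intro hmem
    obtain ⟨i, hi, hv⟩ := List.getElem_of_mem hmem
    have hi' : i < j := lt_of_lt_of_le hi (by simp)
    exact hfirst i hi' (by rw [← hv, List.getElem_take])
  · intro hmem
    rw [PySem.List.index?_eq_some_iff]
    refine ⟨d.take j, d.drop (j+1), ?_, by simp [Nat.le_of_lt hj], hmem⟩
    rw [List.getElem_cons_drop, List.take_append_drop]

-- the counted predicate collapses to an equality (or to nothing)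
theorem countP_index (d : List String) (ws : List String) (j : Nat) (hj : j < d.length) :
    (ws.countP (fun w => PySem.List.index? d w == some j) : Int)
      = if PySem.List.index? d d[j] = some j then (ws.count d[j] : Int) else 0 := by
  split_ifs with h
  · rw [List.count_eq_countP]
    congr 1
    apply List.countP_congr
    intro w _
    simp only [beq_iff_eq]
    constructor
    · intro hw
      obtain ⟨_, hv⟩ := index?_some_val d w j hw
      exact hv.symm
    · intro hw
      subst hw; exact h
  · have hz : ws.countP (fun w => PySem.List.index? d w == some j) = 0 := by
      rw [List.countP_eq_zero]
      intro w _ hw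
      have hw' : PySem.List.index? d w = some j := by simpa using hw
      obtain ⟨_, hv⟩ := index?_some_val d w j hw'
      rw [← hv] at hw'
      exact h hw'
    rw [hz]
    rfl

-- a dictionary word with an earlier duplicate occurs at least twice in the dictionary
theorem two_in_dict (d : List String) (j : Nat) (hj : j < d.length) (hmem : d[j] ∈ d.take j) :
    2 ≤ d.count d[j] := by
  have hsplit : d.take j ++ d[j] :: d.drop (j + 1) = d := by
    rw [List.getElem_cons_drop, List.take_append_drop]
  calc 2 ≤ (d.take j ++ d[j] :: d.drop (j + 1)).count d[j] := by
        rw [List.count_append, List.count_cons_self]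
        have := List.one_le_count_iff.mpr hmem
        omega
    _ = d.count d[j] := by rw [hsplit]

-- ===== VERDICT (by name: the statement is the Claim_ definition above) =====
theorem freq_encode_spec : Claim_equal_freq_encode := by
  intro s d _ hpre
  unfold Spec_freq_encode freq_encode freq_encode_alt
  simp only []
  set ws := PySem.Str.split₀ (PySem.Str.lower s) with hws
  apply List.ext_getElem
  · rw [lenA]; simp
  · intro j h1 h2
    have hj : j < d.length := by simpa using h2
    rw [← List.getD_eq_getElem _ 0 h1, ptA d ws _ j (by simpa using hj)]
    rw [List.getElem_map, PySem.Dict.getD_foldl_insert_add_one, countP_index d ws j hj]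
    rw [List.getD_eq_getElem _ _ (by simpa using hj), List.getElem_replicate]
    have hempty : (PySem.Dict.empty : PySem.Dict String Int).getD d[j] 0 = 0 := rfl
    by_cases hmem : d[j] ∈ d.take j
    · -- duplicate entry: A writes 0 here, and Pre_ forces d[j] ∉ ws so the count is 0 too
      rw [if_neg ((index?_self_iff d j hj).not.mpr (not_not_intro hmem))]
      have hnot : d[j] ∉ ws := by
        intro hin
        have := hpre d[j] hin
        have := two_in_dict d j hj hmem
        omega
      rw [List.count_eq_zero.mpr hnot, hempty]
      simp
    · rw [if_pos ((index?_self_iff d j hj).mpr hmem), hempty]
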